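-- pv_equiv track=rewrite | github.com/Kryax/observer-vault | 01-Projects/trading-system/src/universe_expansion.py | apply_persistence_filter
-- ===== SOURCE A (Python) =====
-- PERSISTENCE_THRESHOLDS = {"Kinetic": 3, "Quiet": 24}
--
-- def apply_persistence_filter(regimes: list[str]) -> list[str]:
--     thresholds = PERSISTENCE_THRESHOLDS
--     confirmed = list(regimes)
--     current = regimes[0]
--     pending = current
--     pending_count = 0
--     for i in range(len(regimes)):
--         raw = regimes[i]
--         if raw == current:
--             confirmed[i] = current
--             pending = current
--             pending_count = 0
--         elif raw == pending:
--             pending_count += 1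
--             if pending_count >= thresholds.get(raw, 24):
--                 current = pending
--             confirmed[i] = current
--         else:
--             pending = raw
--             pending_count = 1
--             confirmed[i] = current
--     return confirmed
-- ===== SOURCE B (Python) =====
-- PERSISTENCE_THRESHOLDS = {"Kinetic": 3, "Quiet": 24}
--
-- def apply_persistence_filter(regimes: list[str]) -> list[str]:
--     # run-length decomposition: process each maximal run of equal regimes at once
--     current = regimes[0]
--     out = []
--     i, n = 0, len(regimes)
--     while i < n:
--         value = regimes[i]
--         j = i + 1
--         while j < n and regimes[j] == value:
--             j += 1
--         length = j - i
--         if value == current: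
--             out += [current] * length
--         else:
--             t = PERSISTENCE_THRESHOLDS.get(value, 24)
--             keep = min(t - 1, length)
--             out += [current] * keep
--             out += [value] * (length - keep)
--             if length >= t:
--                 current = value
--         i = j
--     return out
-- ===== Notes on version B (the rewrite author's own statement) =====
-- stated objective: alternative
-- what changed: B run-length-decomposes the regime list into maximal runs and emits each run's output in one step from the persistence threshold (keep = min(t-1, run length)), instead of A's element-by-element state machine with pending/pending_count.
import Mathlib
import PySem

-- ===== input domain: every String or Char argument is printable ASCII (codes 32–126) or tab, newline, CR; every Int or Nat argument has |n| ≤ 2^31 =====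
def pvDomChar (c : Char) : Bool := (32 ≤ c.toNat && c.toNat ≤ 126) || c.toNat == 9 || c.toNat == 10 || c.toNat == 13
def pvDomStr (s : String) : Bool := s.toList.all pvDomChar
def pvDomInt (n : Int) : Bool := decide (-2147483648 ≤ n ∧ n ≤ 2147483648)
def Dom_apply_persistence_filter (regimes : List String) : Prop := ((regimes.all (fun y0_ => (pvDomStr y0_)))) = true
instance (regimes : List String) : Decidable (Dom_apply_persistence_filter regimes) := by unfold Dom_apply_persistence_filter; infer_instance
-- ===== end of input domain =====

-- B is a run-length decomposition of the same persistence filter: same return value on every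
-- non-empty input (objective: alternative decomposition; no speed claim).

-- PERSISTENCE_THRESHOLDS = {"Kinetic": 3, "Quiet": 24}  (module constant used by both programs)
def pvThresholds : PySem.Dict String Int :=
  PySem.Dict.ofList [("Kinetic", 3), ("Quiet", 24)]

-- ===== PORT A =====
-- loop body of A's 'for i in range(len(regimes))', state (confirmed, current, pending, pending_count)
def pvStepA (s : List String × String × String × Int) (p : Int × String) :
    List String × String × String × Int :=
  let raw := p.2
  if raw = s.2.1 then
    (PySem.List.pySetD s.1 p.1 s.2.1, s.2.1, s.2.1, (0 : Int))
  else if raw = s.2.2.1 then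
    let pending_count := s.2.2.2 + 1
    let current := if pending_count ≥ PySem.Dict.getD pvThresholds raw 24 then s.2.2.1 else s.2.1
    (PySem.List.pySetD s.1 p.1 current, current, s.2.2.1, pending_count)
  else
    (PySem.List.pySetD s.1 p.1 s.2.1, s.2.1, raw, (1 : Int))

def apply_persistence_filter (regimes : List String) : List String :=
  -- current = regimes[0] raises IndexError on []; Pre_ excludes the empty list
  let current := PySem.List.pyGetD regimes 0 ""
  ((PySem.List.pyRange 0 regimes.length 1).foldl
      (fun s i => pvStepA s (i, PySem.List.pyGetD regimes i ""))
      (regimes, current, current, (0 : Int))).1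

-- ===== PORT B =====
-- inner while loop of Source B: length of the leading run of v, and the rest
def pvRun (v : String) : List String → Nat × List String
  | [] => (0, [])
  | x :: xs => if x = v then ((pvRun v xs).1 + 1, (pvRun v xs).2) else (0, x :: xs)

theorem pvRun_len_le (v : String) : ∀ l : List String, (pvRun v l).2.length ≤ l.length := by
  intro l; induction l with
  | nil => simp [pvRun]
  | cons x xs ih =>
    by_cases h : x = v
    · simp [pvRun, h]; omega
    · simp [pvRun, h]

-- outer while loop of Source B, over maximal runs
def pvLoop (current : String) : List String → List String
  | [] => []
  | x :: xs =>
    let r := pvRun x xs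
    let len : Int := (r.1 : Int) + 1
    if x = current then
      List.replicate len.toNat current ++ pvLoop current r.2
    else
      let t := PySem.Dict.getD pvThresholds x 24
      let keep := min (t - 1) len
      List.replicate keep.toNat current ++ List.replicate (len - keep).toNat x ++
        pvLoop (if len ≥ t then x else current) r.2
termination_by l => l.length
decreasing_by
  all_goals exact Nat.lt_succ_of_le (pvRun_len_le x xs)

def apply_persistence_filter_alt (regimes : List String) : List String :=
  pvLoop (PySem.List.pyGetD regimes 0 "") regimes

-- ===== PRECONDITION & SPEC =====
-- Pre_ excludes exactly the empty list, on which Python A raises IndexError at regimes[0]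
def Pre_apply_persistence_filter (regimes : List String) : Prop := regimes ≠ []
instance (regimes : List String) : Decidable (Pre_apply_persistence_filter regimes) := by
  unfold Pre_apply_persistence_filter; infer_instance

def pvWitness_apply_persistence_filter : List String := ["Quiet", "Kinetic", "Quiet"]

def Spec_apply_persistence_filter (regimes : List String) (out : List String) : Prop :=
  out = apply_persistence_filter_alt regimes
instance (regimes : List String) (out : List String) :
    Decidable (Spec_apply_persistence_filter regimes out) := by
  unfold Spec_apply_persistence_filter; infer_instance

-- ===== CLAIM (what is proved, stated in full; the proofs are below) =====
def Claim_equal_apply_persistence_filter : Prop :=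
  ∀ (regimes : List String), Dom_apply_persistence_filter regimes →
    Pre_apply_persistence_filter regimes →
    Spec_apply_persistence_filter regimes (apply_persistence_filter regimes)

-- ===== LEMMAS AND PROOFS =====

def pvThr (v : String) : Int := PySem.Dict.getD pvThresholds v 24

theorem pvThr_ge_two (v : String) : 2 ≤ pvThr v := by
  unfold pvThr pvThresholds
  by_cases h1 : v = "Kinetic"
  · subst h1; decide
  · by_cases h2 : v = "Quiet"
    · subst h2; decide
    · have : PySem.Dict.getD (PySem.Dict.ofList [("Kinetic", (3:Int)), ("Quiet", 24)]) v 24 = 24 := by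
        show PySem.Dict.getD (PySem.Dict.mk [("Kinetic", (3:Int)), ("Quiet", 24)]) v 24 = 24
        simp [PySem.Dict.getD, PySem.Dict.get?, Ne.symm h1, Ne.symm h2]
      rw [this]; norm_num

-- element-wise scan equal to A's loop, with the confirmed list replaced by emitted output
def pvAscan (cur pend : String) (c : Int) : List String → List String
  | [] => []
  | raw :: rest =>
    if raw = cur then cur :: pvAscan cur cur 0 rest
    else if raw = pend then
      let cur' := if c + 1 ≥ pvThr raw then pend else cur
      cur' :: pvAscan cur' pend (c + 1) rest
    else cur :: pvAscan cur raw 1 rest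

theorem pvBridge : ∀ (suffix pre : List String) (cur pend : String) (c : Int),
    ((PySem.List.enumerate suffix (pre.length : Int)).foldl pvStepA
        (pre ++ suffix, cur, pend, c)).1 = pre ++ pvAscan cur pend c suffix := by
  intro suffix
  induction suffix with
  | nil => intro pre cur pend c; simp [PySem.List.enumerate_nil, pvAscan]
  | cons x xs ih =>
    intro pre cur pend c
    have key : ∀ (v cur' pend' : String) (c' : Int),
        ((PySem.List.enumerate xs ((pre.length : Int) + 1)).foldl pvStepA
            (pre ++ v :: xs, cur', pend', c')).1 = pre ++ v :: pvAscan cur' pend' c' xs := by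
      intro v cur' pend' c'
      have h2 : pre ++ v :: xs = (pre ++ [v]) ++ xs := by simp
      have h3 : ((pre.length : Int) + 1) = (((pre ++ [v]).length : Int)) := by simp
      rw [h2, h3, ih]; simp
    rw [PySem.List.enumerate_cons]
    simp only [List.foldl_cons]
    by_cases h1 : x = cur
    · have hs : pvStepA (pre ++ x :: xs, cur, pend, c) ((pre.length : Int), x)
          = (pre ++ cur :: xs, cur, cur, 0) := by
        simp [pvStepA, h1]
      rw [hs, key]
      simp [pvAscan, h1]
    · by_cases h2 : x = pend
      · subst h2
        have hs : pvStepA (pre ++ x :: xs, cur, x, c) ((pre.length : Int), x)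
            = (pre ++ (if c + 1 ≥ PySem.Dict.getD pvThresholds x 24 then x else cur) :: xs,
               (if c + 1 ≥ PySem.Dict.getD pvThresholds x 24 then x else cur), x, c + 1) := by
          simp [pvStepA, h1]
        rw [hs, key]
        simp [pvAscan, h1, pvThr]
      · have hs : pvStepA (pre ++ x :: xs, cur, pend, c) ((pre.length : Int), x)
            = (pre ++ cur :: xs, cur, x, 1) := by
          simp [pvStepA, h1, h2]
        rw [hs, key]
        simp [pvAscan, h1, h2]

theorem pvRun_spec (v : String) : ∀ l : List String,
    List.replicate (pvRun v l).1 v ++ (pvRun v l).2 = l := by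
  intro l; induction l with
  | nil => simp [pvRun]
  | cons x xs ih =>
    by_cases h : x = v
    · subst h; simp [pvRun, List.replicate_succ]; exact ih
    · simp [pvRun, h]

theorem pvRun_head (v : String) : ∀ (l : List String) (x : String),
    x ∈ (pvRun v l).2.head? → x ≠ v := by
  intro l; induction l with
  | nil => simp [pvRun]
  | cons y ys ih =>
    intro x hx
    by_cases h : y = v
    · simp [pvRun, h] at hx; exact ih x hx
    · simp [pvRun, h] at hx; subst hx; exact h

theorem pvAscan_run_cur (u : String) (rest : List String)
    (hrec : ∀ (pend : String) (c : Int),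
      (pend = u ∨ ∀ x ∈ rest.head?, x ≠ pend) → pvAscan u pend c rest = pvLoop u rest) :
    ∀ (k : Nat) (c : Int),
      pvAscan u u c (List.replicate k u ++ rest) = List.replicate k u ++ pvLoop u rest := by
  intro k
  induction k with
  | zero => intro c; simpa using hrec u c (Or.inl rfl)
  | succ k ih =>
    intro c
    simp only [List.replicate_succ, List.cons_append, pvAscan, ih 0, if_true]

theorem pvAscan_run_new (cur v : String) (rest : List String) (hv : v ≠ cur)
    (hhead : ∀ x ∈ rest.head?, x ≠ v)
    (hrec : ∀ (cur' pend : String) (c : Int),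
      (pend = cur' ∨ ∀ x ∈ rest.head?, x ≠ pend) → pvAscan cur' pend c rest = pvLoop cur' rest) :
    ∀ (k : Nat) (c : Int), 1 ≤ c → c < pvThr v →
      pvAscan cur v c (List.replicate k v ++ rest) =
        List.replicate (min k (pvThr v - c - 1).toNat) cur ++
          List.replicate (k - (pvThr v - c - 1).toNat) v ++
          pvLoop (if (k : Int) ≥ pvThr v - c then v else cur) rest := by
  intro k
  induction k with
  | zero =>
    intro c hc1 hc2
    have hn : ¬ (((0:Nat) : Int) ≥ pvThr v - c) := by push_cast; omega
    simp only [List.replicate_zero, List.nil_append]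
    rw [hrec cur v c (Or.inr hhead), if_neg hn]
    simp
  | succ k ih =>
    intro c hc1 hc2
    have hv' : ¬ (v = cur) := hv
    simp only [List.replicate_succ, List.cons_append, pvAscan, if_neg hv', if_true]
    by_cases hf : c + 1 ≥ pvThr v
    · rw [if_pos hf]
      rw [pvAscan_run_cur v rest (fun pend c h => hrec v pend c h) k (c+1)]
      have e0 : (pvThr v - c - 1).toNat = 0 := by omega
      have e1 : (((k+1 : Nat)) : Int) ≥ pvThr v - c := by push_cast; omega
      rw [e0, if_pos e1]
      simp [List.replicate_succ]
    · rw [if_neg hf]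
      rw [ih (c+1) (by omega) (by omega)]
      have e1 : (pvThr v - c - 1).toNat = (pvThr v - (c+1) - 1).toNat + 1 := by omega
      have e2 : (if (k : Int) ≥ pvThr v - (c+1) then v else cur)
          = (if (((k+1 : Nat)) : Int) ≥ pvThr v - c then v else cur) := by
        by_cases h : (k : Int) ≥ pvThr v - (c+1)
        · rw [if_pos h, if_pos (by push_cast at h ⊢; omega)]
        · rw [if_neg h, if_neg (by push_cast at h ⊢; omega)]
      rw [e1, Nat.succ_min_succ, Nat.succ_sub_succ, e2]
      simp [List.replicate_succ]

theorem pvMain : ∀ (n : Nat) (l : List String), l.length ≤ n →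
    ∀ (cur pend : String) (c : Int), (pend = cur ∨ ∀ x ∈ l.head?, x ≠ pend) →
      pvAscan cur pend c l = pvLoop cur l := by
  intro n
  induction n with
  | zero =>
    intro l hl cur pend c _
    have hnil : l = [] := List.length_eq_zero_iff.mp (Nat.le_zero.mp hl)
    subst hnil; simp [pvAscan, pvLoop]
  | succ n ih =>
    intro l hl cur pend c H
    match l with
    | [] => simp [pvAscan, pvLoop]
    | x :: xs =>
      have hxs : xs.length ≤ n := by simpa using hl
      have hrun : List.replicate (pvRun x xs).1 x ++ (pvRun x xs).2 = xs := pvRun_spec x xs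
      have hhead : ∀ y ∈ (pvRun x xs).2.head?, y ≠ x := fun y hy => pvRun_head x xs y hy
      have hlen : (pvRun x xs).2.length ≤ n := le_trans (pvRun_len_le x xs) hxs
      have hrec : ∀ (cur' pend' : String) (c' : Int),
          (pend' = cur' ∨ ∀ y ∈ (pvRun x xs).2.head?, y ≠ pend') →
          pvAscan cur' pend' c' (pvRun x xs).2 = pvLoop cur' (pvRun x xs).2 :=
        fun cur' pend' c' h' => ih (pvRun x xs).2 hlen cur' pend' c' h'
      have hT : 2 ≤ pvThr x := pvThr_ge_two x
      by_cases hx : x = cur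
      · subst hx
        rw [show pvAscan x pend c (x :: xs) = x :: pvAscan x x 0 xs from by simp [pvAscan]]
        conv_lhs => rw [← hrun]
        rw [pvAscan_run_cur x (pvRun x xs).2 (fun p c h => hrec x p c h) (pvRun x xs).1 0]
        conv_rhs => rw [pvLoop.eq_def]
        have e : ((((pvRun x xs).1 : Int)) + 1).toNat = (pvRun x xs).1 + 1 := by omega
        simp [e, List.replicate_succ]
      · have hxp : x ≠ pend := by
          rcases H with h | h
          · rw [h]; exact hx
          · exact h x (by simp)
        rw [show pvAscan cur pend c (x :: xs) = cur :: pvAscan cur x 1 xs from by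
          simp [pvAscan, hx, hxp]]
        conv_lhs => rw [← hrun]
        rw [pvAscan_run_new cur x (pvRun x xs).2 hx hhead hrec (pvRun x xs).1 1
          (le_refl 1) (by omega)]
        conv_rhs => rw [pvLoop.eq_def]
        simp only [hx, if_false, pvThr] at hT ⊢
        have e1 : (min (pvThresholds.getD x 24 - 1) (((pvRun x xs).1 : Int) + 1)).toNat
            = min (pvRun x xs).1 (pvThresholds.getD x 24 - 1 - 1).toNat + 1 := by omega
        have e2 : ((((pvRun x xs).1 : Int) + 1)
              - min (pvThresholds.getD x 24 - 1) (((pvRun x xs).1 : Int) + 1)).toNat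
            = (pvRun x xs).1 - (pvThresholds.getD x 24 - 1 - 1).toNat := by omega
        rw [e1, e2]
        by_cases h : (((pvRun x xs).1 : Int)) ≥ pvThresholds.getD x 24 - 1
        · rw [if_pos h, if_pos (show (((pvRun x xs).1 : Int) + 1) ≥ pvThresholds.getD x 24 by omega)]
          simp [List.replicate_succ]
        · rw [if_neg h, if_neg (show ¬ ((((pvRun x xs).1 : Int) + 1) ≥ pvThresholds.getD x 24) by omega)]
          simp [List.replicate_succ]

-- ===== VERDICT (by name: the statement is the Claim_ definition above) =====
theorem apply_persistence_filter_spec : Claim_equal_apply_persistence_filter := by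
  intro regimes _ _
  unfold Spec_apply_persistence_filter apply_persistence_filter apply_persistence_filter_alt
  have h1 : (PySem.List.pyRange 0 regimes.length 1).foldl
        (fun s i => pvStepA s (i, PySem.List.pyGetD regimes i ""))
        (regimes, PySem.List.pyGetD regimes 0 "", PySem.List.pyGetD regimes 0 "", (0 : Int))
      = (PySem.List.enumerate regimes 0).foldl pvStepA
        (regimes, PySem.List.pyGetD regimes 0 "", PySem.List.pyGetD regimes 0 "", (0 : Int)) := by
    rw [PySem.List.enumerate_eq_map_pyRange (d := ""), List.foldl_map]
    simp [PySem.List.len]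
  have h2 := pvBridge regimes []
      (PySem.List.pyGetD regimes 0 "") (PySem.List.pyGetD regimes 0 "") 0
  simp only [List.nil_append, List.length_nil, Nat.cast_zero] at h2
  simp only [h1, h2]
  exact pvMain regimes.length regimes (le_refl _)
    (PySem.List.pyGetD regimes 0 "") (PySem.List.pyGetD regimes 0 "") 0 (Or.inl rfl)
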